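-- pv_equiv track=rewrite | github.com/miliar/Code_Jam_Webscraper | solutions_python/Problem_178/2159.py | pancake
-- ===== SOURCE A (Python) =====
-- def pancake(string):
--
--     stack = string[0]
--     count = 0
--     for s in string[1::]:
--         if stack != s:
--             count +=1
--             stack = s
--
--     if string[-1] =='-':
--         count +=1
--     return count
-- ===== SOURCE B (Python) =====
-- def _runs(string):
--     # run-length compression: one representative per maximal run of equal characters
--     groups = []
--     i = 0
--     n = len(string)
--     while i < n:
--         groups.append(string[i])
--         j = i + 1
--         while j < n and string[j] == string[i]:
--             j += 1
--         i = j
--     return groups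
--
-- def pancake(string):
--     groups = _runs(string)
--     return len(groups) - 1 + (1 if string[-1] == '-' else 0)
-- ===== Notes on version B (the rewrite author's own statement) =====
-- stated objective: alternative
-- what changed: B first compresses the string into its maximal runs of equal characters with a recursive run-length compression helper, then computes the answer purely arithmetically as (number of runs) - 1 plus the final-character check, instead of A's single stateful scan carrying a previous-character variable and an incrementing counter.
import Mathlib
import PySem

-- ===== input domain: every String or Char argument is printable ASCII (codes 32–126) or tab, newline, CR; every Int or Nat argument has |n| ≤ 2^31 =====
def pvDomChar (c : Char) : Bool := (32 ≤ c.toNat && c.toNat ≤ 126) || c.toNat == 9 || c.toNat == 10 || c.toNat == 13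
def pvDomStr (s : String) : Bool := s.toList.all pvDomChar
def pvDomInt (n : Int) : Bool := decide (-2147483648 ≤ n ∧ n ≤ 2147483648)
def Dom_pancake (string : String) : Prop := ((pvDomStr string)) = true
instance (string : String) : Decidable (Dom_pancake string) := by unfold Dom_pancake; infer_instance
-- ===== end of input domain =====

-- B compresses the string into maximal runs of equal characters (recursive run-length compression)
-- and returns (#runs - 1) plus the final-character check, instead of A's stateful incremental scan.

-- ===== PORT A =====
def pancake (string : String) : Int :=
  match PySem.Str.pyGet? string 0 with
  | none => 0  -- string[0] raises IndexError on the empty string; excluded by Pre_pancake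
  | some c0 =>
    let r := (PySem.List.slice string.toList (some 1) none).foldl
      (fun (sc : Char × Int) s => if sc.1 ≠ s then (s, sc.2 + 1) else sc) (c0, 0)
    if PySem.Str.pyGet? string (-1) = some '-' then r.2 + 1 else r.2

-- ===== PORT B =====
/-- `_runs`: one representative per maximal run; the while loop skipping
equal leading characters is `dropWhile (· == c)` on the tail. -/
def pvRuns : List Char → List Char
  | [] => []
  | c :: t => c :: pvRuns (t.dropWhile (fun s => s == c))
termination_by l => l.length
decreasing_by
  simp only [List.length_cons]
  exact Nat.lt_succ_of_le (List.length_dropWhile_le _ _)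

def pancake_alt (string : String) : Int :=
  let groups := pvRuns string.toList
  (groups.length : Int) - 1 + (if PySem.Str.pyGet? string (-1) = some '-' then 1 else 0)

-- ===== PRECONDITION & SPEC =====
-- A (and B) index string[-1] / string[0]: the empty string raises IndexError, so it is excluded.
def Pre_pancake (string : String) : Prop := string ≠ ""
instance (string : String) : Decidable (Pre_pancake string) := by unfold Pre_pancake; infer_instance
def pvWitness_pancake : String := ("-+-")
def Spec_pancake (string : String) (out : Int) : Prop := out = pancake_alt string
instance (string : String) (out : Int) : Decidable (Spec_pancake string out) := by unfold Spec_pancake; infer_instance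

-- ===== CLAIM (what is proved, stated in full; the proofs are below) =====
def Claim_equal_pancake : Prop := ∀ (string : String), Dom_pancake string → Pre_pancake string → Spec_pancake string (pancake string)

-- ===== LEMMAS AND PROOFS =====

/-- transition count of the sequence starting with `c` followed by `rest` -/
def pvCtr : Char → List Char → Int
  | _, [] => 0
  | c, s :: t => (if c ≠ s then 1 else 0) + pvCtr s t

theorem pvFoldA (rest : List Char) : ∀ (c : Char) (n : Int),
    (rest.foldl (fun (sc : Char × Int) s => if sc.1 ≠ s then (s, sc.2 + 1) else sc) (c, n)).2
      = n + pvCtr c rest := by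
  induction rest with
  | nil => intro c n; simp [pvCtr]
  | cons s t ih =>
    intro c n
    rw [List.foldl_cons]
    by_cases h : c = s
    · rw [if_neg (by simp [h]), ih, pvCtr]
      simp [h]
    · rw [if_pos h, ih, pvCtr]
      simp only [if_pos h]
      ring

theorem pvRunsLen (t : List Char) : ∀ c : Char,
    ((pvRuns (c :: t)).length : Int) = 1 + pvCtr c t := by
  induction t with
  | nil => intro c; simp [pvRuns, pvCtr]
  | cons s t' ih =>
    intro c
    by_cases h : c = s
    · have : pvRuns (c :: s :: t') = pvRuns (c :: t') := by
        rw [pvRuns, pvRuns]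
        subst h
        simp [List.dropWhile]
      rw [this, ih c, pvCtr]
      simp [h]
    · have : pvRuns (c :: s :: t') = c :: pvRuns (s :: t') := by
        rw [pvRuns]
        have hb : (s == c) = false := by simp [Ne.symm h]
        simp [List.dropWhile, hb]
      rw [this, pvCtr, if_pos h]
      simp only [List.length_cons]
      push_cast
      rw [ih s]
      ring

-- ===== VERDICT (by name: the statement is the Claim_ definition above) =====
theorem pancake_spec : Claim_equal_pancake := by
  intro string _ hpre
  unfold Spec_pancake pancake pancake_alt
  have hne : string.toList ≠ [] := by
    intro h
    exact hpre (String.toList_eq_nil_iff.mp h)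
  obtain ⟨c, rest, hcs⟩ := List.exists_cons_of_ne_nil hne
  have h0 : PySem.Str.pyGet? string 0 = some c := by
    simp [hcs]
  rw [h0, hcs]
  simp only [PySem.List.slice_from_one, List.tail_cons, pvFoldA, pvRunsLen]
  split <;> ring
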